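-- pv_equiv track=rewrite | github.com/pabloschwarzenberg/grader | hito2_ej1/hito2_ej1_b04fd8ef624771ebe4489d610d6e46ac.py | validarSecuencia
-- ===== SOURCE A (Python) =====
-- def validarSecuencia(secuencia):
--   letrasNoValidas = "bdefhijklmnopqrsuvwxyz"
--   valido = True
--   for i in range(len(letrasNoValidas)):
--       if(secuencia.find(letrasNoValidas[i]) != -1):
--         valido=False
--
--   resultado=""
--   if(valido):
--    resultado="['___TG_______A__C_G__TT_C_AGTAGTCGATT']"
--
--   else:
--     resultado="Secuencia Incorrecta"
--
--   return resultado
-- ===== SOURCE B (Python) =====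
-- _INVALID = set("bdefhijklmnopqrsuvwxyz")
--
-- def validarSecuencia(secuencia):
--     if any(c in _INVALID for c in secuencia):
--         return "Secuencia Incorrecta"
--     return "['___TG_______A__C_G__TT_C_AGTAGTCGATT']"
-- ===== Notes on version B (the rewrite author's own statement) =====
-- stated objective: simpler
-- what changed: B makes a single early-exiting pass over the characters of secuencia testing set membership, instead of A's loop over the 22 forbidden letters with a full substring scan of secuencia for each.
import Mathlib
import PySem

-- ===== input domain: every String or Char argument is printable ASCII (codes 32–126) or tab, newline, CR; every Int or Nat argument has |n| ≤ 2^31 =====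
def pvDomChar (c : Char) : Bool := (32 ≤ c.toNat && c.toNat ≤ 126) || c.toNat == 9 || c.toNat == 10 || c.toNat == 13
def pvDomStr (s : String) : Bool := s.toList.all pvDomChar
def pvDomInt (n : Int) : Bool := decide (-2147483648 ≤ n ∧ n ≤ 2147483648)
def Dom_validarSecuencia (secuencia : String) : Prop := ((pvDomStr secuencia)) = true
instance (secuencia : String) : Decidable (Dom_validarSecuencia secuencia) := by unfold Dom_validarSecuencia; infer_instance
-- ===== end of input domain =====

-- B: a simpler single early-exiting pass over the characters of secuencia testing membership in a
-- precomputed set of forbidden letters, instead of A's loop over the 22 forbidden letters scanning secuencia for each.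

-- ===== PORT A =====
def validarSecuencia (secuencia : String) : String :=
  let letrasNoValidas : String := "bdefhijklmnopqrsuvwxyz"
  let valido : Bool :=
    (PySem.List.pyRange 0 (PySem.Str.len letrasNoValidas) 1).foldl
      (fun valido i =>
        match PySem.Str.pyGet? letrasNoValidas i with
        | some ch =>
            if PySem.Str.find secuencia (String.singleton ch) != -1 then false else valido
        | none => valido)   -- unreachable: i ranges over valid indices (Python would raise here)
      true
  let resultado : String := ""
  let resultado : String :=
    if valido then "['___TG_______A__C_G__TT_C_AGTAGTCGATT']"
    else "Secuencia Incorrecta"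
  resultado

-- ===== PORT B =====
def pvInvalidSet : List Char := PySem.Set.ofList ("bdefhijklmnopqrsuvwxyz".toList)

def validarSecuencia_alt (secuencia : String) : String :=
  if secuencia.toList.any (fun c => pvInvalidSet.contains c) then "Secuencia Incorrecta"
  else "['___TG_______A__C_G__TT_C_AGTAGTCGATT']"

-- ===== PRECONDITION & SPEC =====
def Spec_validarSecuencia (secuencia : String) (out : String) : Prop := out = validarSecuencia_alt secuencia
instance (secuencia : String) (out : String) : Decidable (Spec_validarSecuencia secuencia out) := by unfold Spec_validarSecuencia; infer_instance

-- ===== CLAIM (what is proved, stated in full; the proofs are below) =====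
def Claim_equal_validarSecuencia : Prop := ∀ (secuencia : String), Dom_validarSecuencia secuencia → Spec_validarSecuencia secuencia (validarSecuencia secuencia)

-- ===== LEMMAS AND PROOFS =====

-- a 'valido = False' flag loop computes the negation of an 'any'
lemma pvFoldlFlag (f : Bool → Int → Bool) (P : Int → Bool)
    (hf : ∀ v i, f v i = if P i then false else v) :
    ∀ (L : List Int) (b : Bool), L.foldl f b = (b && !(L.any P)) := by
  intro L
  induction L with
  | nil => intro b; simp
  | cons i t ih =>
      intro b
      simp only [List.foldl_cons, List.any_cons, hf]
      cases h : P i <;> simp [ih]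

lemma pvSingletonInfix {α : Type} (a : α) (l : List α) : [a] <:+: l ↔ a ∈ l := by
  constructor
  · intro h; exact h.mem (List.mem_singleton_self a)
  · intro h
    obtain ⟨p, q, rfl⟩ := List.append_of_mem h
    exact ⟨p, q, by simp⟩

-- secuencia.find(single letter) != -1  is membership of that letter in secuencia
lemma pvFindChar (s : String) (ch : Char) :
    (PySem.Str.find s (String.singleton ch) != -1) = s.toList.contains ch := by
  rw [Bool.eq_iff_iff]
  simp [bne_iff_ne, PySem.Chars.find_ne_neg_one_iff, pvSingletonInfix]

-- an 'any' over the indices of xs is an 'any' over xs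
lemma pvAnyIndex (xs : List Char) (Q : Char → Bool) :
    ((PySem.List.pyRange 0 (xs.length : Int) 1).any
      (fun i => match PySem.List.pyGet? xs i with
                | some ch => Q ch
                | none => false)) = xs.any Q := by
  rw [Bool.eq_iff_iff]
  simp only [List.any_eq_true, PySem.List.mem_pyRange_one]
  constructor
  · rintro ⟨i, ⟨h0, hl⟩, hq⟩
    rcases h : PySem.List.pyGet? xs i with _ | ch
    · rw [h] at hq; simp at hq
    · rw [h] at hq
      exact ⟨ch, PySem.List.mem_of_pyGet?_eq_some xs h, hq⟩
  · rintro ⟨ch, hmem, hq⟩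
    obtain ⟨k, hk, hget⟩ := List.mem_iff_getElem.mp hmem
    refine ⟨(k : Int), ⟨by positivity, by exact_mod_cast hk⟩, ?_⟩
    rw [PySem.List.pyGet?_natCast]
    simp [List.getElem?_eq_getElem hk, hget, hq]

lemma pvAnySwap {α : Type} [BEq α] [LawfulBEq α] (l1 l2 : List α) :
    (l1.any fun c => l2.contains c) = (l2.any fun c => l1.contains c) := by
  rw [Bool.eq_iff_iff]
  simp only [List.any_eq_true, List.contains_iff_mem]
  exact ⟨fun ⟨a, h1, h2⟩ => ⟨a, h2, h1⟩, fun ⟨a, h1, h2⟩ => ⟨a, h2, h1⟩⟩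

lemma pvInvalidContains (c : Char) :
    pvInvalidSet.contains c = ("bdefhijklmnopqrsuvwxyz".toList).contains c := by
  rw [Bool.eq_iff_iff]
  simp only [List.contains_iff_mem, pvInvalidSet, PySem.Set.mem_ofList]

-- ===== VERDICT (by name: the statement is the Claim_ definition above) =====
theorem validarSecuencia_spec : Claim_equal_validarSecuencia := by
  intro s _
  unfold Spec_validarSecuencia validarSecuencia_alt
  simp only [pvInvalidContains]
  simp only [validarSecuencia]
  rw [PySem.Str.len_eq]
  have hv := pvFoldlFlag
    (fun valido i =>
      match PySem.Str.pyGet? "bdefhijklmnopqrsuvwxyz" i with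
      | some ch =>
          if PySem.Str.find s (String.singleton ch) != -1 then false else valido
      | none => valido)
    (fun i =>
      match PySem.List.pyGet? ("bdefhijklmnopqrsuvwxyz".toList) i with
      | some ch => s.toList.contains ch
      | none => false)
    (by
      intro v i
      beta_reduce
      rw [show PySem.Str.pyGet? "bdefhijklmnopqrsuvwxyz" i
            = PySem.List.pyGet? ("bdefhijklmnopqrsuvwxyz".toList) i from by
          simp [PySem.Str.pyGet?_eq]]
      cases h : PySem.List.pyGet? ("bdefhijklmnopqrsuvwxyz".toList) i with
      | none => rfl
      | some ch => simp only [pvFindChar])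
  rw [hv, pvAnyIndex, pvAnySwap, Bool.true_and]
  cases h : s.toList.any fun c => ("bdefhijklmnopqrsuvwxyz".toList).contains c <;> simp
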